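-- pv_equiv track=rewrite | github.com/teodor1006/Bachelor-thesis | DQC_Partition/RandomPartitions.py | count_local_gates
-- ===== SOURCE A (Python) =====
-- def count_local_gates(gate_list,part_qbits):
--     local_gates = 0
--     for gate in gate_list:
--         gate_qbits = set(gate)
--         is_local = False
--         for qubits in part_qbits:
--             if gate_qbits.issubset(qubits):
--                 is_local = True
--                 break
--         if is_local:
--             local_gates += 1
--     return local_gates
-- ===== SOURCE B (Python) =====
-- def count_local_gates(gate_list, part_qbits):
--     # Inverted index: qubit -> set of indices of blocks containing it.
--     index = {}
--     for j, block in enumerate(part_qbits):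
--         for q in block:
--             index[q] = index.get(q, set()) | {j}
--     all_idx = set(range(len(part_qbits)))
--     count = 0
--     for gate in gate_list:
--         cand = all_idx
--         for q in gate:
--             cand = cand & index.get(q, set())
--         if cand:
--             count += 1
--     return count
-- ===== Notes on version B (the rewrite author's own statement) =====
-- stated objective: alternative
-- what changed: Replaces the per-gate rescan of all blocks with a subset test by an inverted index (qubit -> set of block indices) built once; each gate is counted iff the intersection of its qubits' candidate-block sets (seeded with all block indices) is non-empty.
import Mathlib
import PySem

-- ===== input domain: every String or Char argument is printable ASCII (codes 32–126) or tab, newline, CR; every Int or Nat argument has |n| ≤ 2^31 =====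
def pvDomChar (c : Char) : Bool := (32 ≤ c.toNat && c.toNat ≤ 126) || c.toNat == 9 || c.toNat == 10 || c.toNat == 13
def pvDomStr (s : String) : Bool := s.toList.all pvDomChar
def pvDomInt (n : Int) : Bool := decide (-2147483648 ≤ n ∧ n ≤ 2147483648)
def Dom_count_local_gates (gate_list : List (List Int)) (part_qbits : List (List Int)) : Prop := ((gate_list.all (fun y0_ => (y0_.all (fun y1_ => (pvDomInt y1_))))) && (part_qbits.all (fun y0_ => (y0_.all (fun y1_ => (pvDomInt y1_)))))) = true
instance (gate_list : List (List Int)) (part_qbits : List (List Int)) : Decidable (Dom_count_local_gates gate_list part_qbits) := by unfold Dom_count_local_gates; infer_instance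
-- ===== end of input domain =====

-- B replaces A's per-gate scan of all blocks (subset test, break on first hit) by an
-- inverted index qubit -> set of block indices, intersecting candidate sets per gate
-- (objective: alternative decomposition; same result, proved equal below).

-- ===== PORT A =====
-- inner 'for qubits in part_qbits: if gate_qbits.issubset(qubits): is_local = True; break'
def pvInnerA (gq : PySem.Set Int) : List (List Int) → Bool
  | [] => false
  | qubits :: rest => if PySem.Set.issubset gq qubits then true else pvInnerA gq rest

def count_local_gates (gate_list : List (List Int)) (part_qbits : List (List Int)) : Int :=
  gate_list.foldl (fun local_gates gate =>
    let gate_qbits : PySem.Set Int := PySem.Set.ofList gate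
    let is_local := pvInnerA gate_qbits part_qbits
    if is_local then local_gates + 1 else local_gates) 0

-- ===== PORT B =====
-- 'for j, block in enumerate(part_qbits): for q in block: index[q] = index.get(q, set()) | {j}'
def pvBuildIndex (part_qbits : List (List Int)) : PySem.Dict Int (List Int) :=
  (PySem.List.enumerate part_qbits 0).foldl (fun index jb =>
    jb.2.foldl (fun index q =>
      index.insert q (PySem.Set.union (index.getD q []) [jb.1])) index) PySem.Dict.empty

def count_local_gates_alt (gate_list : List (List Int)) (part_qbits : List (List Int)) : Int :=
  let index := pvBuildIndex part_qbits
  let all_idx : PySem.Set Int := PySem.Set.ofList (PySem.List.pyRange 0 (part_qbits.length : Int) 1)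
  gate_list.foldl (fun count gate =>
    let cand := gate.foldl (fun cand q => PySem.Set.inter cand (index.getD q [])) all_idx
    if cand.isEmpty then count else count + 1) 0

-- ===== PRECONDITION & SPEC =====
def Spec_count_local_gates (gate_list : List (List Int)) (part_qbits : List (List Int)) (out : Int) : Prop := out = count_local_gates_alt gate_list part_qbits
instance (gate_list : List (List Int)) (part_qbits : List (List Int)) (out : Int) : Decidable (Spec_count_local_gates gate_list part_qbits out) := by unfold Spec_count_local_gates; infer_instance

-- ===== CLAIM (what is proved, stated in full; the proofs are below) =====
def Claim_equal_count_local_gates : Prop := ∀ (gate_list : List (List Int)) (part_qbits : List (List Int)), Dom_count_local_gates gate_list part_qbits → Spec_count_local_gates gate_list part_qbits (count_local_gates gate_list part_qbits)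

-- ===== LEMMAS AND PROOFS =====

-- A's inner break-loop is the existential "some block contains every qubit of the gate".
lemma pvInnerA_iff (gq : PySem.Set Int) (blocks : List (List Int)) :
    pvInnerA gq blocks = true ↔ ∃ b ∈ blocks, ∀ x ∈ gq, x ∈ b := by
  induction blocks with
  | nil => simp [pvInnerA]
  | cons b rest ih =>
    simp only [pvInnerA]
    split_ifs with h
    · exact iff_of_true rfl ⟨b, List.mem_cons_self, (PySem.Set.issubset_iff gq b).mp h⟩
    · rw [ih]
      constructor
      · rintro ⟨c, hc, hall⟩; exact ⟨c, List.mem_cons_of_mem _ hc, hall⟩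
      · rintro ⟨c, hc, hall⟩
        rcases List.mem_cons.mp hc with h' | hc'
        · exact absurd ((PySem.Set.issubset_iff gq b).mpr (h' ▸ hall)) h
        · exact ⟨c, hc', hall⟩

-- membership in the inner index loop over one block
lemma pvIndexBlock_mem (block : List Int) (i : Int) (d : PySem.Dict Int (List Int))
    (j q : Int) :
    j ∈ (block.foldl (fun d q => d.insert q (PySem.Set.union (d.getD q []) [i])) d).getD q []
      ↔ j ∈ d.getD q [] ∨ (j = i ∧ q ∈ block) := by
  induction block generalizing d with
  | nil => simp
  | cons q' rest ih =>
    simp only [List.foldl_cons, ih, PySem.Dict.getD_insert]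
    by_cases hq : q = q'
    · subst hq
      simp [PySem.Set.mem_union]
      tauto
    · simp [hq]

-- membership in the full inverted index: j ∈ index[q] iff block number j contains q
lemma pvBuildIndex_mem_aux (blocks : List (List Int)) (s : Int) (d : PySem.Dict Int (List Int))
    (j q : Int) :
    j ∈ ((PySem.List.enumerate blocks s).foldl (fun index jb =>
        jb.2.foldl (fun index q =>
          index.insert q (PySem.Set.union (index.getD q []) [jb.1])) index) d).getD q []
      ↔ j ∈ d.getD q [] ∨ ∃ (k : Nat), ∃ (h : k < blocks.length), j = s + k ∧ q ∈ blocks[k] := by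
  induction blocks generalizing s d with
  | nil => simp [PySem.List.enumerate_nil]
  | cons b rest ih =>
    rw [PySem.List.enumerate_cons]
    simp only [List.foldl_cons, ih, pvIndexBlock_mem]
    constructor
    · rintro ((hd | ⟨rfl, hb⟩) | ⟨k, hk, rfl, hq⟩)
      · exact Or.inl hd
      · exact Or.inr ⟨0, by simp, by simp, by simpa using hb⟩
      · exact Or.inr ⟨k + 1, by simpa using hk, by push_cast; ring, by simpa using hq⟩
    · rintro (hd | ⟨k, hk, rfl, hq⟩)
      · exact Or.inl (Or.inl hd)
      · cases k with
        | zero => exact Or.inl (Or.inr ⟨by simp, by simpa using hq⟩)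
        | succ k =>
          exact Or.inr ⟨k, by simpa using hk, by push_cast; ring, by simpa using hq⟩

lemma pvBuildIndex_mem (part_qbits : List (List Int)) (j q : Int) :
    j ∈ (pvBuildIndex part_qbits).getD q []
      ↔ ∃ (k : Nat), ∃ (h : k < part_qbits.length), j = (k : Int) ∧ q ∈ part_qbits[k] := by
  have := pvBuildIndex_mem_aux part_qbits 0 PySem.Dict.empty j q
  simpa [pvBuildIndex] using this

-- the intersection fold filters the seed by "every qubit's index set contains j"
lemma pvInterFold_mem (gate : List Int) (f : Int → List Int) (s : List Int) (j : Int) :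
    j ∈ gate.foldl (fun cand q => PySem.Set.inter cand (f q)) s
      ↔ j ∈ s ∧ ∀ q ∈ gate, j ∈ f q := by
  induction gate generalizing s with
  | nil => simp
  | cons q rest ih =>
    simp only [List.foldl_cons, ih, PySem.Set.mem_inter]
    constructor
    · rintro ⟨⟨hs, hf⟩, hall⟩
      refine ⟨hs, ?_⟩
      intro q' hq'
      rcases List.mem_cons.mp hq' with rfl | h
      · exact hf
      · exact hall _ h
    · rintro ⟨hs, hall⟩
      exact ⟨⟨hs, hall q List.mem_cons_self⟩, fun q' hq' => hall q' (List.mem_cons_of_mem _ hq')⟩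

-- per-gate agreement of the two locality tests
lemma pvGate_agree (gate : List Int) (part_qbits : List (List Int)) :
    (pvInnerA (PySem.Set.ofList gate) part_qbits = true)
      ↔ ¬ (gate.foldl (fun cand q =>
            PySem.Set.inter cand ((pvBuildIndex part_qbits).getD q []))
            (PySem.Set.ofList (PySem.List.pyRange 0 (part_qbits.length : Int) 1))).isEmpty := by
  rw [pvInnerA_iff, List.isEmpty_iff]
  simp only [List.eq_nil_iff_forall_not_mem]
  push Not
  constructor
  · rintro ⟨b, hb, hall⟩
    rcases List.mem_iff_getElem.mp hb with ⟨k, hk, rfl⟩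
    refine ⟨(k : Int), (pvInterFold_mem _ _ _ _).mpr ⟨?_, ?_⟩⟩
    · rw [PySem.Set.mem_ofList, PySem.List.mem_pyRange_one]
      exact ⟨Int.natCast_nonneg k, by exact_mod_cast hk⟩
    · intro q hq
      exact (pvBuildIndex_mem _ _ _).mpr
        ⟨k, hk, rfl, hall q ((PySem.Set.mem_ofList _ _).mpr hq)⟩
  · rintro ⟨j, hj⟩
    rcases (pvInterFold_mem _ _ _ _).mp hj with ⟨hjall, hjeach⟩
    rw [PySem.Set.mem_ofList, PySem.List.mem_pyRange_one] at hjall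
    obtain ⟨hj0, hjlt⟩ := hjall
    lift j to ℕ using hj0 with k
    have hk : k < part_qbits.length := by exact_mod_cast hjlt
    refine ⟨part_qbits[k], List.getElem_mem hk, ?_⟩
    intro x hx
    rw [PySem.Set.mem_ofList] at hx
    rcases (pvBuildIndex_mem _ _ _).mp (hjeach x hx) with ⟨k', hk', hkk, hxk⟩
    have : k = k' := by exact_mod_cast hkk
    subst this
    exact hxk

-- ===== VERDICT (by name: the statement is the Claim_ definition above) =====
theorem count_local_gates_spec : Claim_equal_count_local_gates := by
  intro gate_list part_qbits _
  unfold Spec_count_local_gates count_local_gates count_local_gates_alt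
  apply PySem.List.foldl_congr_mem
  intro acc gate _
  simp only
  have h := pvGate_agree gate part_qbits
  by_cases hl : pvInnerA (PySem.Set.ofList gate) part_qbits = true
  · have : ¬ _ := h.mp hl
    simp [hl, this]
  · have hne : ¬ ¬ _ := fun hc => hl (h.mpr hc)
    push Not at hne
    simp [hl, hne]
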